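-- pv_equiv track=rewrite | github.com/RangelGasharov/Python_Basics | algorithms/edabit_make_box_2.0.py | char_box
-- ===== SOURCE A (Python) =====
-- def char_box(num):
--     if not isinstance(num, int):
--         return -1
--     if num < 0:
--         return -1
--     if num == 0:
--         return [[]]
--     matrix = [["" for _ in range(num)] for _ in range(num)]
--     for i in range(num):
--         for j in range(num):
--             if i == 0 or i == num - 1:
--                 matrix[i][j] = "#"
--             elif j == 0 or j == num - 1:
--                 matrix[i][j] = "#"
--             else:
--                 matrix[i][j] = " "
--     return matrix
-- ===== SOURCE B (Python) =====
-- def char_box(num):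
--     if not isinstance(num, int):
--         return -1
--     if num < 0:
--         return -1
--     if num == 0:
--         return [[]]
--     matrix = [[" "] * num for _ in range(num)]
--     for row in matrix:
--         row[0] = "#"
--         row[-1] = "#"
--     matrix[0] = ["#"] * num
--     matrix[num - 1] = ["#"] * num
--     return matrix
-- ===== Notes on version B (the rewrite author's own statement) =====
-- stated objective: alternative
-- what changed: B first builds a full n-by-n matrix of spaces, then paints the border in staged passes (left/right edge of every row, then replaces top and bottom rows), instead of A's per-cell nested if/elif branching.
-- outside the precondition, e.g. on char_box(-1): A returns -1, B returns -1
import Mathlib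
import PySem

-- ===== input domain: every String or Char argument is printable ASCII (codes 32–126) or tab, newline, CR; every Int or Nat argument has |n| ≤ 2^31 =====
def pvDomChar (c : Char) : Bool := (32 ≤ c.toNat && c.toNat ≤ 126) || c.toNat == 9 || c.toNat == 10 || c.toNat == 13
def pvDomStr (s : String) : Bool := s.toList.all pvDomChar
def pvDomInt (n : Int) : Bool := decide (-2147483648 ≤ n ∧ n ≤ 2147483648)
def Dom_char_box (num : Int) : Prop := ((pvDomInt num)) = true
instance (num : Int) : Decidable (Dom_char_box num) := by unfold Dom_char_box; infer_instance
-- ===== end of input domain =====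

-- B fills a matrix of spaces and then paints the border in staged passes, instead of A's per-cell nested branching; objective: alternative.


-- ===== PORT A =====
-- Port of A: per-cell nested loops over range(num) with the same branch order.
-- (The `num < 0` branch, where Python A returns -1 — not a list — is excluded by Pre_char_box.)
def char_box (num : Int) : List (List String) :=
  if num < 0 then []
  else if num = 0 then [[]]
  else
    let n := num.toNat
    (List.range n).map (fun i =>
      (List.range n).map (fun j =>
        if i = 0 ∨ i = n - 1 then "#"
        else if j = 0 ∨ j = n - 1 then "#"
        else " "))

-- ===== PORT B =====
-- Port of B: a matrix of spaces; the in-place border loop (row[0]/row[-1]) becomes a map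
-- over the rows; the two border-row assignments become List.set at indices 0 and n-1.
def char_box_alt (num : Int) : List (List String) :=
  if num < 0 then []
  else if num = 0 then [[]]
  else
    let n := num.toNat
    let matrix := List.replicate n (List.replicate n " ")
    let painted := matrix.map (fun row => (row.set 0 "#").set (n - 1) "#")
    (painted.set 0 (List.replicate n "#")).set (n - 1) (List.replicate n "#")

-- ===== PRECONDITION & SPEC =====
-- Pre_ excludes num < 0, where Python A returns -1, not a list of lists.
def Pre_char_box (num : Int) : Prop := 0 ≤ num
instance (num : Int) : Decidable (Pre_char_box num) := by unfold Pre_char_box; infer_instance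
def pvWitness_char_box : Int := 5

def Spec_char_box (num : Int) (out : List (List String)) : Prop := out = char_box_alt num
instance (num : Int) (out : List (List String)) : Decidable (Spec_char_box num out) := by unfold Spec_char_box; infer_instance

-- ===== CLAIM (what is proved, stated in full; the proofs are below) =====
def Claim_equal_char_box : Prop := ∀ (num : Int), Dom_char_box num → Pre_char_box num → Spec_char_box num (char_box num)

-- ===== LEMMAS AND PROOFS =====

theorem char_box_eq (num : Int) (_h : 0 ≤ num) : char_box num = char_box_alt num := by
  unfold char_box char_box_alt
  split
  · rfl
  · split
    · rfl
    · apply List.ext_getElem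
      · simp
      · intro i h1 h2
        simp only [List.length_map, List.length_set, List.length_replicate,
          List.length_range] at h1 h2
        simp only [List.getElem_map, List.getElem_range, List.getElem_set]
        by_cases hi0 : i = 0
        · subst hi0; simp
        · by_cases hin : i = num.toNat - 1
          · have e1 : ((0 : ℕ) = i) = False := by simp; omega
            have e2 : (num.toNat - 1 = i) = True := by simp [hin]
            have e3 : (i = 0 ∨ i = num.toNat - 1) = True := by simp [hin]
            simp only [e1, e2, e3, if_true, if_false]
            simp
          · have e1 : ((0 : ℕ) = i) = False := by simp; omega
            have e2 : (num.toNat - 1 = i) = False := by simp; omega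
            have e3 : (i = 0 ∨ i = num.toNat - 1) = False := by simp; omega
            simp only [e1, e2, e3, if_true, if_false, List.getElem_replicate]
            apply List.ext_getElem
            · simp
            · intro j hj1 hj2
              simp only [List.length_map, List.length_set, List.length_replicate,
                List.length_range] at hj1 hj2
              simp only [List.getElem_map, List.getElem_range, List.getElem_set,
                List.getElem_replicate]
              by_cases hj0 : j = 0
              · subst hj0; simp
              · by_cases hjn : j = num.toNat - 1
                · have f1 : ((0 : ℕ) = j) = False := by simp; omega
                  have f2 : (num.toNat - 1 = j) = True := by simp [hjn]
                  have f3 : (j = 0 ∨ j = num.toNat - 1) = True := by simp [hjn]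
                  simp only [f1, f2, f3, if_true, if_false]
                · have f1 : ((0 : ℕ) = j) = False := by simp; omega
                  have f2 : (num.toNat - 1 = j) = False := by simp; omega
                  have f3 : (j = 0 ∨ j = num.toNat - 1) = False := by simp; omega
                  simp only [f1, f2, f3, if_true, if_false]

-- ===== VERDICT (by name: the statement is the Claim_ definition above) =====
theorem char_box_spec : Claim_equal_char_box := by
  intro num _ hpre
  unfold Spec_char_box
  exact char_box_eq num hpre
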